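-- pv_equiv track=rewrite | github.com/VictoriaNguyenMD/Computer-Science-Courses | Howard_University/intro_to_python/extra_work/return_1st_non_repeat.py | inner_loop
-- ===== SOURCE A (Python) =====
-- def inner_loop(list_test, outer_val, outer_index): #compare outer num to the numbers inside it
--   boolean_list = []
--   inner_index = 0
--
--   for i in list_test: #Converts to a boolean list
--     boolean_list.append(i == outer_val and inner_index != outer_index)
--     inner_index += 1
--
--   if True not in boolean_list: #if the outer loop value is not in the list
--     return True
-- ===== SOURCE B (Python) =====
-- def inner_loop(list_test, outer_val, outer_index):
--     idx = len(list_test) - 1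
--     while idx >= 0:
--         if list_test[idx] == outer_val and idx != outer_index:
--             return None
--         idx -= 1
--     return True
-- ===== Notes on version B (the rewrite author's own statement) =====
-- stated objective: alternative
-- what changed: Replaces A's two staged forward passes (build a full boolean list, then a membership scan) by a backward index-based while loop that exits early at the first duplicate occurrence and allocates nothing.
import Mathlib
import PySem

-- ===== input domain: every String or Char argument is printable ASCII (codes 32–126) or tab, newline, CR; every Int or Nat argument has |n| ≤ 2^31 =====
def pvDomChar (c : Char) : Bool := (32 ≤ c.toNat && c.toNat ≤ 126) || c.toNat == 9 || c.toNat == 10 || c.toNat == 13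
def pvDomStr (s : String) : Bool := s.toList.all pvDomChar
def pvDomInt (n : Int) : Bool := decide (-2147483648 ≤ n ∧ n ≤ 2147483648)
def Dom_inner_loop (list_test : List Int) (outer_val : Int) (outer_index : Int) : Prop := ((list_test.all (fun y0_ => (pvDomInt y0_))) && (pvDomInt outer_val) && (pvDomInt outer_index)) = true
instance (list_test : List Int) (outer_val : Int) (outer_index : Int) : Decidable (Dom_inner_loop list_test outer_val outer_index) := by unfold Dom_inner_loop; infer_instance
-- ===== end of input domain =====

-- B replaces A's two staged forward passes (build a boolean list, then scan it for True) by a backward index-based while loop with an early exit at the first duplicate occurrence (alternative decomposition, no speed claim).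


-- ===== PORT A =====
def inner_loop (list_test : List Int) (outer_val : Int) (outer_index : Int) : Option Bool :=
  let st := list_test.foldl
    (fun (s : List Bool × Int) i =>
      (s.1 ++ [decide (i = outer_val ∧ s.2 ≠ outer_index)], s.2 + 1))
    ([], 0)
  if true ∈ st.1 then none else some true

-- ===== PORT B =====
-- the backward while loop: idx counts down from len-1 to 0, early exit with None on a match
def whileB (list_test : List Int) (outer_val : Int) (outer_index : Int) (idx : Int) : Option Bool :=
  if 0 ≤ idx then
    if PySem.List.pyGet? list_test idx = some outer_val ∧ idx ≠ outer_index then none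
    else whileB list_test outer_val outer_index (idx - 1)
  else some true
termination_by (idx + 1).toNat
decreasing_by omega

def inner_loop_alt (list_test : List Int) (outer_val : Int) (outer_index : Int) : Option Bool :=
  whileB list_test outer_val outer_index ((list_test.length : Int) - 1)

-- ===== PRECONDITION & SPEC =====
def Spec_inner_loop (list_test : List Int) (outer_val : Int) (outer_index : Int) (out : Option Bool) : Prop := out = inner_loop_alt list_test outer_val outer_index
instance (list_test : List Int) (outer_val : Int) (outer_index : Int) (out : Option Bool) : Decidable (Spec_inner_loop list_test outer_val outer_index out) := by unfold Spec_inner_loop; infer_instance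

-- ===== CLAIM (what is proved, stated in full; the proofs are below) =====
def Claim_equal_inner_loop : Prop := ∀ (list_test : List Int) (outer_val : Int) (outer_index : Int), Dom_inner_loop list_test outer_val outer_index → Spec_inner_loop list_test outer_val outer_index (inner_loop list_test outer_val outer_index)

-- ===== LEMMAS AND PROOFS =====

-- A's fold leaves a True in the boolean list iff some element equal to ov sits at an absolute index ≠ oi
theorem pvFoldA (ov oi : Int) : ∀ (lt : List Int) (acc : List Bool) (k : Int),
    (true ∈ (lt.foldl
      (fun (s : List Bool × Int) i =>
        (s.1 ++ [decide (i = ov ∧ s.2 ≠ oi)], s.2 + 1)) (acc, k)).1)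
    ↔ (true ∈ acc ∨ ∃ j : Nat, lt[j]? = some ov ∧ (k + j : Int) ≠ oi) := by
  intro lt
  induction lt with
  | nil => intro acc k; simp
  | cons x xs ih =>
    intro acc k
    simp only [List.foldl_cons]
    rw [ih]
    constructor
    · rintro (h | ⟨j, hj, hne⟩)
      · simp at h
        rcases h with h | h
        · exact Or.inl h
        · exact Or.inr ⟨0, by simpa using h.1, by simpa using h.2⟩
      · exact Or.inr ⟨j + 1, by simpa using hj, by push_cast at hne ⊢; omega⟩
    · rintro (h | ⟨j, hj, hne⟩)
      · exact Or.inl (by simp [h])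
      · cases j with
        | zero =>
          refine Or.inl ?_
          simp at hj hne
          simp [hj, hne]
        | succ j =>
          refine Or.inr ⟨j, by simpa using hj, by push_cast at hne ⊢; omega⟩

-- B's backward loop returns None iff some element equal to ov sits at an index ≤ idx, index ≠ oi (idx below the length)
theorem pvWhileB (lt : List Int) (ov oi : Int) : ∀ (n : Nat) (idx : Int), (idx + 1).toNat = n → idx < (lt.length : Int) →
    (whileB lt ov oi idx = none ↔ ∃ j : Nat, (j : Int) ≤ idx ∧ lt[j]? = some ov ∧ (j : Int) ≠ oi) := by
  intro n
  induction n with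
  | zero =>
    intro idx hn hlen
    have hneg : idx < 0 := by omega
    rw [whileB]
    rw [if_neg (by omega)]
    simp only [reduceCtorEq, false_iff]
    rintro ⟨j, hj, -, -⟩
    omega
  | succ n ih =>
    intro idx hn hlen
    have h0 : 0 ≤ idx := by omega
    rw [whileB, if_pos h0]
    by_cases hc : PySem.List.pyGet? lt idx = some ov ∧ idx ≠ oi
    · rw [if_pos hc]
      have : PySem.List.pyGet? lt idx = lt[idx.toNat]? := PySem.List.pyGet?_of_nonneg lt h0
      refine iff_of_true rfl ⟨idx.toNat, by omega, by rw [← this]; exact hc.1, by omega⟩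
    · rw [if_neg hc, ih (idx - 1) (by omega) (by omega)]
      have hget : PySem.List.pyGet? lt idx = lt[idx.toNat]? := PySem.List.pyGet?_of_nonneg lt h0
      constructor
      · rintro ⟨j, hj, hjv, hne⟩; exact ⟨j, by omega, hjv, hne⟩
      · rintro ⟨j, hj, hjv, hne⟩
        refine ⟨j, by_contra fun hgt => ?_, hjv, hne⟩
        have hje : (j : Int) = idx := by omega
        have : j = idx.toNat := by omega
        exact hc ⟨by rw [hget, ← this]; exact hjv, by omega⟩

-- B's loop returns only None or some true
theorem pvWhileB_cases (lt : List Int) (ov oi : Int) : ∀ (n : Nat) (idx : Int), (idx + 1).toNat = n →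
    whileB lt ov oi idx = none ∨ whileB lt ov oi idx = some true := by
  intro n
  induction n with
  | zero =>
    intro idx hn
    rw [whileB, if_neg (by omega)]
    exact Or.inr rfl
  | succ n ih =>
    intro idx hn
    rw [whileB]
    split_ifs with h0 hc
    · exact Or.inl rfl
    · exact ih (idx - 1) (by omega)
    · exact Or.inr rfl

-- ===== VERDICT (by name: the statement is the Claim_ definition above) =====
theorem inner_loop_spec : Claim_equal_inner_loop := by
  intro lt ov oi _
  show inner_loop lt ov oi = inner_loop_alt lt ov oi
  have hA := pvFoldA ov oi lt [] 0
  simp only [List.not_mem_nil, false_or, zero_add] at hA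
  have hB := pvWhileB lt ov oi ((lt.length : Int) - 1 + 1).toNat ((lt.length : Int) - 1) rfl (by omega)
  unfold inner_loop inner_loop_alt
  by_cases hex : ∃ j : Nat, lt[j]? = some ov ∧ (j : Int) ≠ oi
  · rw [if_pos (hA.mpr hex)]
    obtain ⟨j, hjv, hne⟩ := hex
    have hjlt : j < lt.length := by
      by_contra h
      simp [List.getElem?_eq_none (show lt.length ≤ j by omega)] at hjv
    exact (hB.mpr ⟨j, by omega, hjv, hne⟩).symm
  · rw [if_neg (fun h => hex (hA.mp h))]
    rcases pvWhileB_cases lt ov oi ((lt.length : Int) - 1 + 1).toNat ((lt.length : Int) - 1) rfl with h | h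
    · exact absurd (hB.mp h) (fun ⟨j, _, hjv, hne⟩ => hex ⟨j, hjv, hne⟩)
    · exact h.symm
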